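-- pv_equiv track=rewrite | github.com/ysoo/eink-reader | server/formatter.py | reflow
-- ===== SOURCE A (Python) =====
-- def reflow(text: str) -> str:
--     """
--     Join consecutive non-blank lines into paragraphs, preserving blank lines
--     as paragraph separators.
--
--     This un-wraps hard-wrapped source files (e.g. Gutenberg 70-char lines)
--     so that stage 3 can re-wrap cleanly at CHARS.
--     """
--     paragraphs = []
--     current: list[str] = []
--
--     for line in text.split("\n"):
--         stripped = line.rstrip()
--         if stripped:
--             current.append(stripped)
--         else:
--             if current:
--                 paragraphs.append(" ".join(current))
--                 current = []
--             paragraphs.append("")  # preserve blank line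
--
--     if current:
--         paragraphs.append(" ".join(current))
--
--     # Collapse runs of more than one blank line to a single blank line.
--     out: list[str] = []
--     prev_blank = False
--     for p in paragraphs:
--         if p == "":
--             if not prev_blank:
--                 out.append("")
--             prev_blank = True
--         else:
--             out.append(p)
--             prev_blank = False
--
--     return "\n".join(out)
-- ===== SOURCE B (Python) =====
-- from itertools import groupby
--
--
-- def reflow(text: str) -> str:
--     stripped = [line.rstrip() for line in text.split("\n")]
--     parts = []
--     for nonblank, run in groupby(stripped, key=bool):
--         parts.append(" ".join(run) if nonblank else "")
--     return "\n".join(parts)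
-- ===== Notes on version B (the rewrite author's own statement) =====
-- stated objective: simpler
-- what changed: A's two passes (build a paragraph list flushing `current` at blanks, then collapse blank runs with a prev_blank flag) become one itertools.groupby traversal over runs of blank/non-blank stripped lines, emitting one joined paragraph per non-blank run and one blank entry per blank run.
import Mathlib
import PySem

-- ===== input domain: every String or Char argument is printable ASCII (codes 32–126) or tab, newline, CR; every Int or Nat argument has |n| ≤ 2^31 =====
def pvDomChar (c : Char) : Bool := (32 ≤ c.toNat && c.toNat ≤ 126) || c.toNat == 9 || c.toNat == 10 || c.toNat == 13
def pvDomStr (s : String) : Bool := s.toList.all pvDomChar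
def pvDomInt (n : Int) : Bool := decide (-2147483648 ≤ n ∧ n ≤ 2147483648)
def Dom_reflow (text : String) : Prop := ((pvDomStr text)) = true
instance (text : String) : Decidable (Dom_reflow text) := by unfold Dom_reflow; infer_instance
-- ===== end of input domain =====

-- B replaces A's two passes (build paragraph list, then collapse blank runs with a prev_blank
-- flag) by one groupby-style traversal over runs of blank/non-blank stripped lines (objective:
-- simpler, single pass over the lines; same output proved equal).

-- ===== PORT A =====
-- first loop of A: build paragraphs, flushing `current` at each blank line
def pvBuildParas (lines : List String) (current : List String) : List String :=
  match lines with
  | [] => if current = [] then [] else [PySem.Str.join " " current]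
  | l :: rest =>
    let stripped := PySem.Str.rstrip l
    if stripped ≠ "" then
      pvBuildParas rest (current ++ [stripped])
    else
      (if current = [] then [] else [PySem.Str.join " " current]) ++ [""] ++ pvBuildParas rest []

-- second loop of A: collapse runs of blank paragraphs using the prev_blank flag
def pvCollapse (ps : List String) (prevBlank : Bool) : List String :=
  match ps with
  | [] => []
  | p :: rest =>
    if p = "" then (if prevBlank then [] else [""]) ++ pvCollapse rest true
    else p :: pvCollapse rest false

def reflow (text : String) : String :=
  -- text.split("\n"): sep is the nonempty literal "\n", so split? is always `some`
  let lines := (PySem.Str.split? text "\n").getD [""]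
  PySem.Str.join "\n" (pvCollapse (pvBuildParas lines []) false)

-- ===== PORT B =====
-- groupby(stripped, key=bool): consume one maximal run per step
def pvGroupRuns (xs : List String) : List String :=
  match xs with
  | [] => []
  | x :: rest =>
    if x ≠ "" then
      PySem.Str.join " " (x :: rest.takeWhile (· ≠ "")) :: pvGroupRuns (rest.dropWhile (· ≠ ""))
    else
      "" :: pvGroupRuns (rest.dropWhile (· = ""))
termination_by xs.length
decreasing_by
  · exact Nat.lt_succ_of_le (List.length_dropWhile_le _ _)
  · exact Nat.lt_succ_of_le (List.length_dropWhile_le _ _)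

def reflow_alt (text : String) : String :=
  let lines := (PySem.Str.split? text "\n").getD [""]
  let stripped := lines.map PySem.Str.rstrip
  PySem.Str.join "\n" (pvGroupRuns stripped)

-- ===== PRECONDITION & SPEC =====
def Spec_reflow (text : String) (out : String) : Prop := out = reflow_alt text
instance (text : String) (out : String) : Decidable (Spec_reflow text out) := by unfold Spec_reflow; infer_instance

-- ===== CLAIM (what is proved, stated in full; the proofs are below) =====
def Claim_equal_reflow : Prop := ∀ (text : String), Dom_reflow text → Spec_reflow text (reflow text)

-- ===== LEMMAS AND PROOFS =====

-- pvBuildParas on already-stripped lines (proof helper; related to pvBuildParas below)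
def pvBP (xs : List String) (current : List String) : List String :=
  match xs with
  | [] => if current = [] then [] else [PySem.Str.join " " current]
  | x :: rest =>
    if x ≠ "" then pvBP rest (current ++ [x])
    else (if current = [] then [] else [PySem.Str.join " " current]) ++ [""] ++ pvBP rest []

theorem pvBuildParas_eq_pvBP (lines : List String) (current : List String) :
    pvBuildParas lines current = pvBP (lines.map PySem.Str.rstrip) current := by
  induction lines generalizing current with
  | nil => rfl
  | cons l rest ih =>
    simp only [pvBuildParas, pvBP, List.map_cons, ih]

-- a " ".join of a nonempty list headed by a nonempty string is nonempty
theorem pvJoin_ne_empty (x : String) (l : List String) (hx : x ≠ "") :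
    PySem.Str.join " " (x :: l) ≠ "" := by
  intro h
  have hlist : (PySem.Str.join " " (x :: l)).toList = [] := by rw [h]; rfl
  rw [PySem.Str.toList_join] at hlist
  have hx' : x.toList ≠ [] := fun h' => hx (String.toList_inj.mp h')
  cases l with
  | nil => exact hx' (by simpa [PySem.Chars.join_singleton] using hlist)
  | cons y ys =>
    rw [List.map_cons, List.map_cons, PySem.Chars.join_cons_cons] at hlist
    simp at hlist

-- mid-run characterisation of A's first loop: with a nonempty `current`, the next emitted
-- paragraph is the join of `current` with the rest of the nonblank run
theorem pvBP_run (xs : List String) (current : List String) (hc : current ≠ []) :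
    pvBP xs current =
      PySem.Str.join " " (current ++ xs.takeWhile (· ≠ "")) ::
        (match xs.dropWhile (· ≠ "") with
         | [] => []
         | _ :: rest => "" :: pvBP rest []) := by
  induction xs generalizing current with
  | nil => simp [pvBP, hc]
  | cons x rest ih =>
    by_cases hx : x = ""
    · subst hx
      simp [pvBP, hc, List.takeWhile, List.dropWhile]
    · rw [pvBP]
      simp only [hx, ne_eq, not_false_iff, if_pos]
      rw [ih (current ++ [x]) (by simp)]
      simp [List.takeWhile, List.dropWhile, hx]

-- main equivalence, both prev_blank states at once, by strong induction on the line list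
theorem pvCollapse_pvBP_eq (n : Nat) :
    ∀ xs : List String, xs.length ≤ n →
      pvCollapse (pvBP xs []) false = pvGroupRuns xs ∧
      pvCollapse (pvBP xs []) true = pvGroupRuns (xs.dropWhile (· = "")) := by
  induction n with
  | zero =>
    intro xs h
    have : xs = [] := List.eq_nil_of_length_eq_zero (Nat.le_zero.mp h)
    subst this
    constructor <;> simp [pvBP, pvCollapse, pvGroupRuns]
  | succ n ih =>
    intro xs hlen
    cases xs with
    | nil => constructor <;> simp [pvBP, pvCollapse, pvGroupRuns]
    | cons x rest =>
      have hrest : rest.length ≤ n := Nat.lt_succ_iff.mp hlen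
      by_cases hx : x = ""
      · subst hx
        constructor
        · -- prev_blank = false: emit one "" and continue with prev_blank = true
          rw [pvGroupRuns]
          simp only [ne_eq, not_true_eq_false, if_false]
          show pvCollapse (pvBP ("" :: rest) []) false = "" :: pvGroupRuns (rest.dropWhile (· = ""))
          rw [pvBP]
          simp only [List.nil_append, ite_true]
          rw [← (ih rest hrest).2]
          simp [pvCollapse]
        · -- prev_blank = true: the "" is skipped
          rw [pvBP]
          simp only [List.dropWhile, decide_true]
          show pvCollapse ([""] ++ pvBP rest []) true = pvGroupRuns (rest.dropWhile (· = ""))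
          rw [← (ih rest hrest).2]
          simp [pvCollapse]
      · -- nonblank head: one whole run is consumed
        have hbp : pvBP (x :: rest) [] =
            PySem.Str.join " " (x :: rest.takeWhile (· ≠ "")) ::
              (match rest.dropWhile (· ≠ "") with
               | [] => []
               | _ :: r => "" :: pvBP r []) := by
          rw [pvBP]
          simp only [hx, ne_eq, not_false_iff, if_true, List.nil_append]
          rw [pvBP_run rest [x] (by simp)]
          rfl
        have hJ : PySem.Str.join " " (x :: rest.takeWhile (· ≠ "")) ≠ "" :=
          pvJoin_ne_empty _ _ hx
        have hgr : pvGroupRuns (x :: rest) =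
            PySem.Str.join " " (x :: rest.takeWhile (· ≠ "")) ::
              pvGroupRuns (rest.dropWhile (· ≠ "")) := by
          rw [pvGroupRuns]; simp [hx]
        have htail : pvCollapse ((match rest.dropWhile (· ≠ "") with
               | [] => []
               | _ :: r => "" :: pvBP r []) : List String) false =
            pvGroupRuns (rest.dropWhile (· ≠ "")) := by
          rcases hdw : rest.dropWhile (· ≠ "") with _ | ⟨y, r⟩
          · simp [pvCollapse, pvGroupRuns]
          · have hy : y = "" := by
              have := List.head?_dropWhile_not (fun s : String => decide (s ≠ "")) rest
              rw [hdw] at this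
              simpa using this
            subst hy
            have hr : r.length ≤ n := by
              have h1 : (rest.dropWhile (· ≠ "")).length ≤ rest.length :=
                List.length_dropWhile_le _ _
              rw [hdw] at h1
              simp at h1
              omega
            simp only [pvCollapse]
            rw [pvGroupRuns]
            simp only [ne_eq, not_true_eq_false, if_false]
            show ([""] ++ pvCollapse (pvBP r []) true : List String) =
              "" :: pvGroupRuns (r.dropWhile (· = ""))
            rw [← (ih r hr).2]
            simp
        constructor
        · rw [hbp, hgr, pvCollapse]
          simp only [hJ, ite_false]
          rw [htail]
        · rw [hbp]
          have : (x :: rest).dropWhile (· = "") = x :: rest := by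
            simp [List.dropWhile, hx]
          rw [this, hgr, pvCollapse]
          simp only [hJ, ite_false]
          rw [htail]

-- ===== VERDICT (by name: the statement is the Claim_ definition above) =====
theorem reflow_spec : Claim_equal_reflow := by
  intro text _
  show PySem.Str.join "\n"
      (pvCollapse (pvBuildParas ((PySem.Str.split? text "\n").getD [""]) []) false) =
    PySem.Str.join "\n"
      (pvGroupRuns (((PySem.Str.split? text "\n").getD [""]).map PySem.Str.rstrip))
  rw [pvBuildParas_eq_pvBP,
    (pvCollapse_pvBP_eq (((PySem.Str.split? text "\n").getD [""]).map PySem.Str.rstrip).length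
      _ le_rfl).1]
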